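-- pv_equiv track=rewrite | github.com/JakeTaranov/poker-equity | server/HandChecker.py | three_of_a_kind_helper
-- ===== SOURCE A (Python) =====
-- def three_of_a_kind_helper(player_cards, board):
--     board_and_player_cards = player_cards + board
--     cur_max_trips = 0
--     rank_counts = {}
--     for rank, _ in board_and_player_cards:
--         rank_counts[rank] = rank_counts.get(rank, 0) + 1
--
--     for rank, count in rank_counts.items():
--         if count == 3:
--             cur_max_trips = max(cur_max_trips, rank)
--
--     return cur_max_trips
-- ===== SOURCE B (Python) =====
-- def three_of_a_kind_helper(player_cards, board):
--     ranks = sorted(r for r, _ in player_cards + board)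
--     best = 0
--     run_val = None
--     run_len = 0
--     for r in ranks:
--         if r == run_val:
--             run_len += 1
--         else:
--             if run_len == 3 and run_val > best:
--                 best = run_val
--             run_val = r
--             run_len = 1
--     if run_len == 3 and run_val > best:
--         best = run_val
--     return best
-- ===== Notes on version B (the rewrite author's own statement) =====
-- stated objective: alternative
-- what changed: Replaces the frequency dictionary plus items() scan by sorting the ranks and a single grouped scan over consecutive runs, keeping the best rank whose run has length exactly 3.
import Mathlib
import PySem

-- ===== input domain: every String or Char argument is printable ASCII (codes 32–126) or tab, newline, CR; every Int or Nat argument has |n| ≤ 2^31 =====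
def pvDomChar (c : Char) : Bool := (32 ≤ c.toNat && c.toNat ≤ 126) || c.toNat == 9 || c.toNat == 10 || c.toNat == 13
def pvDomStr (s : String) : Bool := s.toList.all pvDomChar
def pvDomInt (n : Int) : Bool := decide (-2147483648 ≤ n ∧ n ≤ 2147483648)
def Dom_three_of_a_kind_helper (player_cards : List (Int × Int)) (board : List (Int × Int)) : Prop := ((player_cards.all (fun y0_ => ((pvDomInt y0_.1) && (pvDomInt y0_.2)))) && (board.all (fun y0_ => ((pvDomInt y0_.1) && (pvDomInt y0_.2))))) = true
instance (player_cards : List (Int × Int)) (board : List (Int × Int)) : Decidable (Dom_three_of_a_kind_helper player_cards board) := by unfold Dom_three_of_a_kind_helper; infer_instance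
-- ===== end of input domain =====

-- B replaces A's frequency dictionary + items() scan by sorting the ranks and one grouped
-- scan over consecutive runs (alternative algorithm, same result; no argument is mutated).

-- ===== PORT A =====
def three_of_a_kind_helper (player_cards : List (Int × Int)) (board : List (Int × Int)) : Int :=
  let board_and_player_cards := player_cards ++ board
  let rank_counts : PySem.Dict Int Int :=
    board_and_player_cards.foldl
      (fun d p => d.insert p.1 (d.getD p.1 0 + 1)) PySem.Dict.empty
  rank_counts.items.foldl
    (fun cur_max_trips p => if p.2 == (3 : Int) then max cur_max_trips p.1 else cur_max_trips) 0

-- ===== PORT B =====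
-- loop body of Source B's single for-loop (state: best, run_val, run_len)
def pvBStep (s : Int × Option Int × Int) (r : Int) : Int × Option Int × Int :=
  match s with
  | (best, run_val, run_len) =>
    if run_val == some r then (best, run_val, run_len + 1)
    else
      let best' := match run_val with
        | some v => if run_len == (3 : Int) && decide (best < v) then v else best
        | none => best
      (best', some r, 1)

-- the trailing 'if run_len == 3 and run_val > best' after the loop
def pvBFinish (s : Int × Option Int × Int) : Int :=
  match s with
  | (best, run_val, run_len) =>
    match run_val with
    | some v => if run_len == (3 : Int) && decide (best < v) then v else best
    | none => best

def three_of_a_kind_helper_alt (player_cards : List (Int × Int)) (board : List (Int × Int)) : Int :=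
  let ranks := PySem.List.sorted ((player_cards ++ board).map Prod.fst) (fun x => x) false
  pvBFinish (ranks.foldl pvBStep (0, none, 0))

-- ===== PRECONDITION & SPEC =====
def Spec_three_of_a_kind_helper (player_cards : List (Int × Int)) (board : List (Int × Int)) (out : Int) : Prop := out = three_of_a_kind_helper_alt player_cards board
instance (player_cards : List (Int × Int)) (board : List (Int × Int)) (out : Int) : Decidable (Spec_three_of_a_kind_helper player_cards board out) := by unfold Spec_three_of_a_kind_helper; infer_instance

-- ===== CLAIM (what is proved, stated in full; the proofs are below) =====
def Claim_equal_three_of_a_kind_helper : Prop := ∀ (player_cards : List (Int × Int)) (board : List (Int × Int)), Dom_three_of_a_kind_helper player_cards board → Spec_three_of_a_kind_helper player_cards board (three_of_a_kind_helper player_cards board)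

-- ===== LEMMAS AND PROOFS =====

-- the common "max over ranks whose count is exactly 3" fold step, as a function of the bag l
def pvG (l : List Int) (b k : Int) : Int := if l.count k = 3 then max b k else b

lemma pvG_left_comm (l : List Int) (b x y : Int) : pvG l (pvG l b x) y = pvG l (pvG l b y) x := by
  unfold pvG; split_ifs <;> simp [max_left_comm, max_comm]

-- A's value is the pvG-fold over the distinct ranks
lemma portA_eq (pc bd : List (Int × Int)) :
    three_of_a_kind_helper pc bd =
      (PySem.List.dedup ((pc ++ bd).map Prod.fst)).foldl (pvG ((pc ++ bd).map Prod.fst)) 0 := by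
  show List.foldl (fun cur_max_trips p => if (p.2 == (3:Int)) = true then max cur_max_trips p.1 else cur_max_trips) 0
      ((pc ++ bd).foldl (fun d p => d.insert p.1 (d.getD p.1 0 + 1)) PySem.Dict.empty).items = _
  rw [show (pc ++ bd).foldl (fun d p => d.insert p.1 (d.getD p.1 0 + 1)) PySem.Dict.empty
        = PySem.Dict.counter ((pc ++ bd).map Prod.fst) by
      rw [← PySem.Dict.foldl_insert_getD_add_one_eq_counter, List.foldl_map]]
  rw [PySem.Dict.items_counter, List.foldl_map, PySem.List.dedup_eq_ofList]
  refine PySem.List.foldl_congr_mem _ _ _ _ ?_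
  intro acc k _
  set c := (List.map Prod.fst (pc ++ bd)).count k with hc
  unfold pvG
  rcases eq_or_ne c 3 with h | h
  · rw [if_pos (by rw [h]; rfl), if_pos h]
  · rw [if_neg (by simp only [beq_iff_eq]; omega), if_neg h]

-- processing a run of equal elements just extends run_len
lemma pvBStep_replicate (k : Nat) (a best len : Int) :
    (List.replicate k a).foldl pvBStep (best, some a, len) = (best, some a, len + k) := by
  induction k generalizing len with
  | zero => simp
  | succ k ih =>
      simp only [List.replicate_succ, List.foldl_cons, pvBStep, BEq.rfl, if_true]
      rw [ih]; refine Prod.ext rfl (Prod.ext rfl ?_); push_cast; ring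

-- a sorted cons decomposes into its leading run and a strictly larger sorted tail
lemma sorted_cons_decomp (a : Int) :
    ∀ rest, List.Pairwise (· ≤ ·) (a :: rest) →
      ∃ (k : Nat) (t : List Int), rest = List.replicate k a ++ t ∧ (∀ x ∈ t, a < x) ∧
        List.Pairwise (· ≤ ·) t := by
  intro rest
  induction rest with
  | nil => intro _; exact ⟨0, [], by simp, by simp, List.Pairwise.nil⟩
  | cons b rest' ih =>
      intro h
      have hab : a ≤ b := (List.pairwise_cons.mp h).1 b (by simp)
      have hb : List.Pairwise (· ≤ ·) (b :: rest') := (List.pairwise_cons.mp h).2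
      rcases lt_or_eq_of_le hab with hlt | heq
      · refine ⟨0, b :: rest', by simp, ?_, hb⟩
        intro x hx
        rcases List.mem_cons.mp hx with rfl | hx'
        · exact hlt
        · exact lt_of_lt_of_le hlt ((List.pairwise_cons.mp hb).1 x hx')
      · subst heq
        obtain ⟨k, t, ht, hgt, hst⟩ := ih hb
        exact ⟨k + 1, t, by simp [List.replicate_succ, ht], hgt, hst⟩

-- building a set never disturbs an element already present, and fresh front elements commute out
lemma foldl_add_cons : ∀ (t s : List Int) (a : Int), a ∉ t →
    t.foldl PySem.Set.add (a :: s) = a :: t.foldl PySem.Set.add s := by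
  intro t
  induction t with
  | nil => intro s a _; simp
  | cons x t' ih =>
      intro s a ha
      have hxa : x ≠ a := by
        intro h; exact ha (h ▸ List.mem_cons_self)
      simp only [List.foldl_cons]
      rw [show PySem.Set.add (a :: s) x = a :: PySem.Set.add s x by
            simp only [PySem.Set.add, PySem.Set.contains]
            split_ifs <;> simp_all]
      exact ih _ _ (fun h => ha (List.mem_cons_of_mem _ h))

lemma foldl_add_replicate (k : Nat) (a : Int) :
    (List.replicate k a).foldl PySem.Set.add [a] = [a] := by
  induction k with
  | zero => rfl
  | succ k ih =>
      simpa [List.replicate_succ, PySem.Set.add, PySem.Set.contains] using ih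

-- dedup of a leading run followed by fresh elements
lemma dedup_run (a : Int) (k : Nat) (t : List Int) (ha : a ∉ t) :
    PySem.List.dedup (a :: (List.replicate k a ++ t)) = a :: PySem.List.dedup t := by
  rw [PySem.List.dedup_eq_ofList, PySem.List.dedup_eq_ofList,
      PySem.Set.ofList_eq_foldl, PySem.Set.ofList_eq_foldl]
  simp only [List.foldl_cons, List.foldl_append]
  rw [show PySem.Set.add [] a = [a] from rfl, foldl_add_replicate, foldl_add_cons t [] a ha]

-- the scan over a sorted list computes the pvG-fold over its distinct elements
lemma scan_eq : ∀ (n : Nat) (s : List Int), s.length ≤ n → List.Pairwise (· ≤ ·) s →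
    ∀ best : Int, pvBFinish (s.foldl pvBStep (best, none, 0)) =
      (PySem.List.dedup s).foldl (pvG s) best := by
  intro n
  induction n with
  | zero =>
      intro s hl _ best
      have hnil : s = [] := List.eq_nil_of_length_eq_zero (Nat.le_zero.mp hl)
      subst hnil; rfl
  | succ n ih =>
      intro s hl hs best
      cases s with
      | nil => rfl
      | cons a rest =>
        obtain ⟨k, t, hrest, hgt, hst⟩ := sorted_cons_decomp a rest hs
        subst hrest
        have hat : a ∉ t := fun h => lt_irrefl a (hgt a h)
        have hcount_a : (a :: (List.replicate k a ++ t)).count a = k + 1 := by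
          simp [List.count_append, List.count_eq_zero_of_not_mem hat]
        have hcount_t : ∀ x ∈ t, (a :: (List.replicate k a ++ t)).count x = t.count x := by
          intro x hx
          have hxa : x ≠ a := fun h => lt_irrefl a (h ▸ hgt x hx)
          simp [List.count_append, List.count_replicate, Ne.symm hxa]
        set best' := if ((1 + (k:Int)) == (3:Int) && decide (best < a)) = true then a else best
          with hbest'
        have hstep1 : pvBStep (best, none, 0) a = (best, some a, 1) := rfl
        have hfold : (a :: (List.replicate k a ++ t)).foldl pvBStep (best, none, 0)
            = t.foldl pvBStep (best, some a, 1 + (k:Int)) := by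
          simp only [List.foldl_cons, List.foldl_append, hstep1, pvBStep_replicate]
        have hG : pvG (a :: (List.replicate k a ++ t)) best a = best' := by
          unfold pvG
          rw [hcount_a, hbest']
          by_cases hk : k = 2
          · subst hk
            rw [if_pos (by norm_num)]
            rcases lt_or_ge best a with h | h
            · rw [if_pos (by simp [h])]
              exact max_eq_right h.le
            · rw [if_neg (by simp [not_lt.mpr h])]
              exact max_eq_left h
          · rw [if_neg (by omega), if_neg (by simp only [Bool.and_eq_true, beq_iff_eq]; omega)]
        have hL : pvBFinish (t.foldl pvBStep (best, some a, 1 + (k:Int)))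
            = pvBFinish (t.foldl pvBStep (best', none, 0)) := by
          cases t with
          | nil => simp [pvBFinish, hbest']
          | cons b t' =>
              have hab : a ≠ b := fun h => lt_irrefl a (h ▸ hgt b List.mem_cons_self)
              simp only [List.foldl_cons]
              congr 1
              simp [pvBStep, hab, hbest']
        have ht_len : t.length ≤ n := by
          simp only [List.length_cons, List.length_append, List.length_replicate] at hl
          omega
        rw [hfold, hL, ih t ht_len hst best', dedup_run a k t hat]
        simp only [List.foldl_cons, hG]
        refine PySem.List.foldl_congr_mem _ _ _ _ ?_
        intro acc x hx
        unfold pvG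
        rw [hcount_t x ((PySem.List.mem_dedup t x).mp hx)]

-- ===== VERDICT (by name: the statement is the Claim_ definition above) =====
theorem three_of_a_kind_helper_spec : Claim_equal_three_of_a_kind_helper := by
  intro pc bd _
  unfold Spec_three_of_a_kind_helper
  have hperm : (PySem.List.sorted ((pc ++ bd).map Prod.fst) (fun x => x) false).Perm
      ((pc ++ bd).map Prod.fst) := PySem.List.sorted_perm _ _ _
  have hsp : List.Pairwise (· ≤ ·)
      (PySem.List.sorted ((pc ++ bd).map Prod.fst) (fun x => x) false) := by
    simpa using PySem.List.sorted_pairwise ((pc ++ bd).map Prod.fst) (fun x => x)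
  have hB : three_of_a_kind_helper_alt pc bd
      = (PySem.List.dedup (PySem.List.sorted ((pc ++ bd).map Prod.fst) (fun x => x) false)).foldl
          (pvG (PySem.List.sorted ((pc ++ bd).map Prod.fst) (fun x => x) false)) 0 :=
    scan_eq _ _ le_rfl hsp 0
  have hcb : (PySem.List.dedup (PySem.List.sorted ((pc ++ bd).map Prod.fst) (fun x => x) false)).foldl
          (pvG (PySem.List.sorted ((pc ++ bd).map Prod.fst) (fun x => x) false)) 0
      = (PySem.List.dedup (PySem.List.sorted ((pc ++ bd).map Prod.fst) (fun x => x) false)).foldl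
          (pvG ((pc ++ bd).map Prod.fst)) 0 :=
    PySem.List.foldl_congr_mem _ _ _ _ (fun acc x _ => by unfold pvG; rw [hperm.count_eq x])
  have hdperm : (PySem.List.dedup ((pc ++ bd).map Prod.fst)).Perm
      (PySem.List.dedup (PySem.List.sorted ((pc ++ bd).map Prod.fst) (fun x => x) false)) :=
    (List.perm_ext_iff_of_nodup (PySem.List.nodup_dedup _) (PySem.List.nodup_dedup _)).mpr
      (fun x => by simp)
  rw [portA_eq, hB, hcb]
  exact hdperm.foldl_eq (rcomm := ⟨fun b x y => pvG_left_comm _ b x y⟩) 0
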